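-- pv_equiv track=rewrite | github.com/justynaFornalik/space-orphan | cold_game.py | compare_user_guess_with_correct_answer
-- ===== SOURCE A (Python) =====
-- def compare_user_guess_with_correct_answer(user_guess, correct_answer):
--     cold_warm_hot = []
--     for i, item in enumerate(user_guess):
--         if item in correct_answer:
--             if user_guess[i] == correct_answer[i]:
--                 cold_warm_hot.append("Hot")
--             else:
--                 cold_warm_hot.append("Warm")
--     cold_warm_hot.sort()
--     if not cold_warm_hot:
--         cold_warm_hot.append("Cold")
--     return cold_warm_hot
-- ===== SOURCE B (Python) =====
-- def compare_user_guess_with_correct_answer(user_guess, correct_answer):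
--     hot = 0
--     warm = 0
--     for i, item in enumerate(user_guess):
--         if item in correct_answer:
--             if item == correct_answer[i]:
--                 hot += 1
--             else:
--                 warm += 1
--     if hot + warm == 0:
--         return ["Cold"]
--     return ["Hot"] * hot + ["Warm"] * warm
-- ===== Notes on version B (the rewrite author's own statement) =====
-- stated objective: simpler
-- what changed: Replaces collecting labels into a list and sorting it by two integer counters and direct construction of the already-ordered result via list repetition, removing the sort.
import Mathlib
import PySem

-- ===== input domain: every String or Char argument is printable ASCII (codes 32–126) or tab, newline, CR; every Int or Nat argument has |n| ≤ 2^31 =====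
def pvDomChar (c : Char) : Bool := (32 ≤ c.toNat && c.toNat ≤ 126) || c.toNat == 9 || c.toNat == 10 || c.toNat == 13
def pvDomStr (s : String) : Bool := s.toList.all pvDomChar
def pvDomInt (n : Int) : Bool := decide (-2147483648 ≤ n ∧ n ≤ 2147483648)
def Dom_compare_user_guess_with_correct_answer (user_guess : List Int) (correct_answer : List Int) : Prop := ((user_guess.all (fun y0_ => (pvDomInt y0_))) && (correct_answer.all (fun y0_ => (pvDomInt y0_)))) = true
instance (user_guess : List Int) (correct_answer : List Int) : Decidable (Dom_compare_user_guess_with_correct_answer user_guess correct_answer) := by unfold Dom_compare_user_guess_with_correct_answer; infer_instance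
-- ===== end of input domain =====

-- B replaces A's collect-then-sort by two counters and direct construction of the ordered result (objective: simpler).

-- ===== PORT A =====
-- A's loop: collect "Hot"/"Warm"; user_guess[i] / correct_answer[i] ported as pyGet?
-- option equality (exact under Pre_, where both indexings are in range; Python raises outside Pre_)
def cuwcaLoopA (user_guess : List Int) (correct_answer : List Int) : List String :=
  (PySem.List.enumerate user_guess).foldl (fun acc p =>
    if p.2 ∈ correct_answer then
      if PySem.List.pyGet? user_guess p.1 = PySem.List.pyGet? correct_answer p.1 then acc ++ ["Hot"]
      else acc ++ ["Warm"]
    else acc) []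

def compare_user_guess_with_correct_answer (user_guess : List Int) (correct_answer : List Int) : List String :=
  let sorted := PySem.List.sorted (cuwcaLoopA user_guess correct_answer) (fun x => x) false
  if sorted = [] then ["Cold"] else sorted

-- ===== PORT B =====
-- Source B's counting loop; correct_answer[i] ported as pyGet? (Python raises outside Pre_)
def cuwcaLoopB (user_guess : List Int) (correct_answer : List Int) : Nat × Nat :=
  (PySem.List.enumerate user_guess).foldl (fun hw p =>
    if p.2 ∈ correct_answer then
      if some p.2 = PySem.List.pyGet? correct_answer p.1 then (hw.1 + 1, hw.2)
      else (hw.1, hw.2 + 1)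
    else hw) (0, 0)

def compare_user_guess_with_correct_answer_alt (user_guess : List Int) (correct_answer : List Int) : List String :=
  let hw := cuwcaLoopB user_guess correct_answer
  if hw.1 + hw.2 = 0 then ["Cold"]
  else List.replicate hw.1 "Hot" ++ List.replicate hw.2 "Warm"

-- ===== PRECONDITION & SPEC =====
-- Pre_ excludes exactly the inputs where Python A raises IndexError: some index i with
-- user_guess[i] ∈ correct_answer but i ≥ len(correct_answer) (Python B raises there too).
def Pre_compare_user_guess_with_correct_answer (user_guess : List Int) (correct_answer : List Int) : Prop :=
  ∀ i < user_guess.length, user_guess[i]! ∈ correct_answer → i < correct_answer.length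
instance (user_guess : List Int) (correct_answer : List Int) : Decidable (Pre_compare_user_guess_with_correct_answer user_guess correct_answer) := by unfold Pre_compare_user_guess_with_correct_answer; infer_instance

def pvWitness_compare_user_guess_with_correct_answer : List Int × List Int := ([3, 1, 7], [1, 2, 3])

def Spec_compare_user_guess_with_correct_answer (user_guess : List Int) (correct_answer : List Int) (out : List String) : Prop := out = compare_user_guess_with_correct_answer_alt user_guess correct_answer
instance (user_guess : List Int) (correct_answer : List Int) (out : List String) : Decidable (Spec_compare_user_guess_with_correct_answer user_guess correct_answer out) := by unfold Spec_compare_user_guess_with_correct_answer; infer_instance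

-- ===== CLAIM (what is proved, stated in full; the proofs are below) =====
def Claim_equal_compare_user_guess_with_correct_answer : Prop := ∀ (user_guess : List Int) (correct_answer : List Int), Dom_compare_user_guess_with_correct_answer user_guess correct_answer → Pre_compare_user_guess_with_correct_answer user_guess correct_answer → Spec_compare_user_guess_with_correct_answer user_guess correct_answer (compare_user_guess_with_correct_answer user_guess correct_answer)

-- ===== LEMMAS AND PROOFS =====

-- On enumerate indices, indexing user_guess gives back the enumerated item.
theorem pyGet?_enumerate_fst (ug : List Int) (p : Int × Int)
    (hp : p ∈ PySem.List.enumerate ug) :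
    PySem.List.pyGet? ug p.1 = some p.2 := by
  rcases (PySem.List.mem_enumerate_iff ug 0 p).mp hp with ⟨k, hk, rfl⟩
  simp [PySem.List.pyGet?_natCast, List.getElem?_eq_getElem hk]

-- Collecting under a test is mapping over the filtered list.
theorem foldl_if_append {α : Type} (c : α → Prop) [DecidablePred c] (g : α → String) :
    ∀ (ps : List α) (acc : List String),
    ps.foldl (fun acc p => if c p then acc ++ [g p] else acc) acc
      = acc ++ (ps.filter (fun p => decide (c p))).map g := by
  intro ps
  induction ps with
  | nil => intro acc; simp
  | cons q qs ih =>
    intro acc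
    by_cases hq : c q <;> simp [hq, ih]

-- A's loop equals the labels of the matching pairs.
theorem cuwcaLoopA_eq (ug ca : List Int) :
    cuwcaLoopA ug ca =
      (((PySem.List.enumerate ug).filter (fun p => decide (p.2 ∈ ca))).map
        (fun p => if some p.2 = PySem.List.pyGet? ca p.1 then "Hot" else "Warm")) := by
  unfold cuwcaLoopA
  rw [PySem.List.foldl_congr_mem
    (g := fun acc p =>
      if p.2 ∈ ca then acc ++ [if some p.2 = PySem.List.pyGet? ca p.1 then "Hot" else "Warm"]
      else acc)]
  · rw [foldl_if_append (fun p : Int × Int => p.2 ∈ ca)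
      (fun p => if some p.2 = PySem.List.pyGet? ca p.1 then "Hot" else "Warm")]
    simp
  · intro acc p hp
    rw [pyGet?_enumerate_fst ug p hp]
    by_cases h1 : p.2 ∈ ca <;> by_cases h2 : some p.2 = PySem.List.pyGet? ca p.1 <;>
      simp [h1, h2]

-- B's counters count the "Hot"s and "Warm"s of the same label list.
theorem cuwcaLoopB_eq_aux (ca : List Int) (ps : List (Int × Int)) :
    ∀ (h w : Nat),
    ps.foldl (fun hw p =>
      if p.2 ∈ ca then
        if some p.2 = PySem.List.pyGet? ca p.1 then (hw.1 + 1, hw.2)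
        else (hw.1, hw.2 + 1)
      else hw) (h, w)
    = (h + ((ps.filter (fun p => decide (p.2 ∈ ca))).map
              (fun p => if some p.2 = PySem.List.pyGet? ca p.1 then "Hot" else "Warm")).count "Hot",
       w + ((ps.filter (fun p => decide (p.2 ∈ ca))).map
              (fun p => if some p.2 = PySem.List.pyGet? ca p.1 then "Hot" else "Warm")).count "Warm") := by
  induction ps with
  | nil => intro h w; simp
  | cons q qs ih =>
    intro h w
    by_cases h1 : q.2 ∈ ca
    · by_cases h2 : some q.2 = PySem.List.pyGet? ca q.1 <;>
        simp [h1, h2, List.foldl_cons, ih] <;> omega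
    · simp [h1, List.foldl_cons, ih]

-- Every label is "Hot" or "Warm".
theorem labels_mem (ca : List Int) (ps : List (Int × Int)) :
    ∀ x ∈ (ps.filter (fun p => decide (p.2 ∈ ca))).map
      (fun p => if some p.2 = PySem.List.pyGet? ca p.1 then "Hot" else "Warm"),
      x = "Hot" ∨ x = "Warm" := by
  intro x hx
  rcases List.mem_map.mp hx with ⟨p, _, rfl⟩
  split <;> simp

-- A two-valued list is a permutation of its counted, ordered form.
theorem perm_rep (L : List String) (hL : ∀ x ∈ L, x = "Hot" ∨ x = "Warm") :
    L.Perm (List.replicate (L.count "Hot") "Hot" ++ List.replicate (L.count "Warm") "Warm") := by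
  induction L with
  | nil => simp
  | cons x t ih =>
    have ht : ∀ y ∈ t, y = "Hot" ∨ y = "Warm" := fun y hy => hL y (List.mem_cons_of_mem x hy)
    rcases hL x (List.mem_cons_self) with rfl | rfl
    · have hH : List.count "Hot" (("Hot" : String) :: t) = t.count "Hot" + 1 := by simp
      have hW : List.count "Warm" (("Hot" : String) :: t) = t.count "Warm" := by simp
      rw [hH, hW, List.replicate_succ, List.cons_append]
      exact (ih ht).cons "Hot"
    · have hH : List.count "Hot" (("Warm" : String) :: t) = t.count "Hot" := by simp
      have hW : List.count "Warm" (("Warm" : String) :: t) = t.count "Warm" + 1 := by simp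
      rw [hH, hW, List.replicate_succ]
      exact ((ih ht).cons "Warm").trans List.perm_middle.symm

-- count "Hot" + count "Warm" = length for a two-valued list.
theorem count_sum (L : List String) (hL : ∀ x ∈ L, x = "Hot" ∨ x = "Warm") :
    L.count "Hot" + L.count "Warm" = L.length := by
  induction L with
  | nil => simp
  | cons x t ih =>
    have ht : ∀ y ∈ t, y = "Hot" ∨ y = "Warm" := fun y hy => hL y (List.mem_cons_of_mem x hy)
    rcases hL x (List.mem_cons_self) with rfl | rfl <;>
      simp [← ih ht] <;> omega

theorem compare_user_guess_with_correct_answer_spec : Claim_equal_compare_user_guess_with_correct_answer := by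
  intro ug ca _ _
  unfold Spec_compare_user_guess_with_correct_answer
  unfold compare_user_guess_with_correct_answer compare_user_guess_with_correct_answer_alt
  have hB : cuwcaLoopB ug ca =
      ((cuwcaLoopA ug ca).count "Hot", (cuwcaLoopA ug ca).count "Warm") := by
    unfold cuwcaLoopB
    rw [cuwcaLoopB_eq_aux, cuwcaLoopA_eq]; simp
  have hmem : ∀ x ∈ cuwcaLoopA ug ca, x = "Hot" ∨ x = "Warm" := by
    rw [cuwcaLoopA_eq]; exact labels_mem ca _
  set L := cuwcaLoopA ug ca with hLdef
  by_cases hnil : L = []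
  · simp [hB, hnil, PySem.List.sorted_eq_nil_iff]
  · have hlen : L.count "Hot" + L.count "Warm" ≠ 0 := by
      rw [count_sum L hmem]
      simpa [List.length_eq_zero_iff] using hnil
    have hperm := perm_rep L hmem
    have hpair : (List.replicate (L.count "Hot") "Hot" ++
        List.replicate (L.count "Warm") "Warm").Pairwise (α := String) (· ≤ ·) := by
      rw [List.pairwise_append]
      refine ⟨List.pairwise_replicate.mpr (Or.inr le_rfl),
              List.pairwise_replicate.mpr (Or.inr le_rfl), ?_⟩
      intro a ha b hb
      rw [List.eq_of_mem_replicate ha, List.eq_of_mem_replicate hb,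
        String.le_iff_toList_le]
      decide
    have hsorted := PySem.List.sorted_id_eq_of_perm_of_pairwise L _ hperm.symm hpair
    have hsne : PySem.List.sorted L (fun x => x) false ≠ [] := by
      rw [hsorted]
      intro hc
      apply hlen
      have := congrArg List.length hc
      simpa using this
    simp only [hB, if_neg hlen, if_neg hsne]
    exact hsorted
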